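-- pv_equiv track=rewrite | github.com/MaximAndrei20/UBB-University-Work | sem1/Fundaments of Programming (Python)/4/main.py | generate_dp_matrix
-- ===== SOURCE A (Python) =====
-- def generate_dp_matrix(S, k, dp):
--     n = len(S)
--     for i in range(n + 1):
--         dp[i][0] = True
--
--     for j in range(1, k + 1):
--         dp[0][j] = False
--
--     for i in range(1, n + 1):
--         for j in range(1, k + 1):
--             if j < S[i - 1]:
--                 dp[i][j] = dp[i - 1][j]
--             else:
--                 dp[i][j] = dp[i - 1][j] or dp[i - 1][j - S[i - 1]]
--
--     return dp
-- ===== SOURCE B (Python) =====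
-- def generate_dp_matrix(S, k, dp):
--     # Reachable-sum sets: row_sets[i] = set of subset sums of S[:i] that are <= k.
--     reach = {0}
--     row_sets = [reach]
--     for s in S:
--         reach = reach | {r + s for r in reach if r + s <= k}
--         row_sets.append(reach)
--     # Render each row from its set by membership.
--     for i, R in enumerate(row_sets):
--         dp[i][0] = True
--         for j in range(1, k + 1):
--             dp[i][j] = j in R
--     return dp
-- ===== Notes on version B (the rewrite author's own statement) =====
-- stated objective: alternative
-- what changed: Replaces A's cell-by-cell matrix recurrence dp[i][j] = dp[i-1][j] or dp[i-1][j-S[i-1]] by a reachable-sum-set algorithm: one pass builds, per prefix of S, the set of subset sums that are <= k, and a second pass renders each row of the matrix by membership queries into its set - no cell of dp is ever read.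
import Mathlib
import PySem

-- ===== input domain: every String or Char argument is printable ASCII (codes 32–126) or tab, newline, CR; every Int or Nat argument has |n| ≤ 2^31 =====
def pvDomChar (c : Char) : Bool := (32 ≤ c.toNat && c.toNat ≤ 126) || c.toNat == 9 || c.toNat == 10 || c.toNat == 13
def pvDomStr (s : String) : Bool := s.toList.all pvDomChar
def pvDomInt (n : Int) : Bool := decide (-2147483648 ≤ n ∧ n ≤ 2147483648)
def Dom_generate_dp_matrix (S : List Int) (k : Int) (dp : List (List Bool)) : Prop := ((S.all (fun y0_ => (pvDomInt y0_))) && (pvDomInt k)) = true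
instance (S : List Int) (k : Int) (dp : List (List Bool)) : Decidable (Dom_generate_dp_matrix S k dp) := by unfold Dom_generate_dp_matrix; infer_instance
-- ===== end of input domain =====

-- B replaces A's cell-by-cell matrix recurrence by a reachable-sum-set algorithm: one pass builds,
-- per prefix of S, the set of subset sums that are ≤ k, and a second pass renders each row by
-- membership queries into its set; same return value on Pre_. Both the Python A and the Python B
-- fill the caller-supplied matrix dp in place; the equivalence proved here is about the returned
-- matrix value.

-- ===== PORT A =====
-- dp[i][j] read (both indices may be any Int; Python negative-index semantics via pyGetD; the
-- default is only reachable outside Pre_, where Python would raise)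
def cellGet (dp : List (List Bool)) (i j : Int) : Bool :=
  PySem.List.pyGetD (PySem.List.pyGetD dp i []) j false
-- dp[i][j] = v write (pySetD: out-of-range writes, where Python raises, are only reachable outside Pre_)
def cellSet (dp : List (List Bool)) (i j : Int) (v : Bool) : List (List Bool) :=
  PySem.List.pySetD dp i (PySem.List.pySetD (PySem.List.pyGetD dp i []) j v)

def generate_dp_matrix (S : List Int) (k : Int) (dp : List (List Bool)) : List (List Bool) :=
  let n : Int := PySem.List.len S
  let dp1 := (PySem.List.pyRange 0 (n + 1) 1).foldl (fun d i => cellSet d i 0 true) dp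
  let dp2 := (PySem.List.pyRange 1 (k + 1) 1).foldl (fun d j => cellSet d 0 j false) dp1
  (PySem.List.pyRange 1 (n + 1) 1).foldl (fun d i =>
    (PySem.List.pyRange 1 (k + 1) 1).foldl (fun d j =>
      if j < PySem.List.pyGetD S (i - 1) 0 then
        cellSet d i j (cellGet d (i - 1) j)
      else
        cellSet d i j (cellGet d (i - 1) j ||
          cellGet d (i - 1) (j - PySem.List.pyGetD S (i - 1) 0))) d) dp2

-- ===== PORT B =====
def generate_dp_matrix_alt (S : List Int) (k : Int) (dp : List (List Bool)) : List (List Bool) :=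
  -- row_sets[i] = set of subset sums of S[:i] that are ≤ k
  let init : PySem.Set Int := PySem.Set.ofList [0]
  let rowSets : List (PySem.Set Int) :=
    (S.foldl (fun (acc : List (PySem.Set Int) × PySem.Set Int) s =>
      let reach := PySem.Set.union acc.2 ((acc.2.filter (fun r => decide (r + s ≤ k))).map (fun r => r + s))
      (acc.1 ++ [reach], reach)) ([init], init)).1
  -- render each row from its set by membership
  (PySem.List.enumerate rowSets 0).foldl (fun d p =>
    let d0 := cellSet d p.1 0 true
    (PySem.List.pyRange 1 (k + 1) 1).foldl (fun d j => cellSet d p.1 j (PySem.Set.contains p.2 j)) d0) dp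

-- ===== PRECONDITION & SPEC =====
-- Pre_ is exactly where A returns, except that it also excludes negative values in S when 0 ≤ k:
-- there A either raises IndexError (dp[i-1][j - S[i-1]] indexes past the row) or, when the rows are
-- longer than k+1, returns values read from cells beyond column k that the fill never wrote — an
-- artefact of the caller-supplied buffer (see cites).
def Pre_generate_dp_matrix (S : List Int) (k : Int) (dp : List (List Bool)) : Prop :=
  S.length + 1 ≤ dp.length ∧
  (∀ m < S.length + 1, k.toNat + 1 ≤ (dp.getD m []).length) ∧
  (0 ≤ k → ∀ x ∈ S, 0 ≤ x)
instance (S : List Int) (k : Int) (dp : List (List Bool)) : Decidable (Pre_generate_dp_matrix S k dp) := by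
  unfold Pre_generate_dp_matrix; infer_instance

def pvWitness_generate_dp_matrix : List Int × Int × List (List Bool) :=
  ([1], 1, [[false, false], [false, false]])

def Spec_generate_dp_matrix (S : List Int) (k : Int) (dp : List (List Bool)) (out : List (List Bool)) : Prop := out = generate_dp_matrix_alt S k dp
instance (S : List Int) (k : Int) (dp : List (List Bool)) (out : List (List Bool)) : Decidable (Spec_generate_dp_matrix S k dp out) := by unfold Spec_generate_dp_matrix; infer_instance

-- ===== CLAIM (what is proved, stated in full; the proofs are below) =====
def Claim_equal_generate_dp_matrix : Prop := ∀ (S : List Int) (k : Int) (dp : List (List Bool)), Dom_generate_dp_matrix S k dp → Pre_generate_dp_matrix S k dp → Spec_generate_dp_matrix S k dp (generate_dp_matrix S k dp)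

-- ===== LEMMAS AND PROOFS =====

-- row fill: set columns 1..b-1 of r to f(j)
def rowSetRange (f : Int → Bool) (b : Int) (r : List Bool) : List Bool :=
  (PySem.List.pyRange 1 b 1).foldl (fun r j => PySem.List.pySetD r j (f j)) r

-- canonical row i: column 0 true, columns 1..k from f
def mkRow (f : Int → Bool) (k : Int) (r : List Bool) : List Bool :=
  rowSetRange f (k + 1) (r.set 0 true)

-- pure truth table of A's recurrence: rv S i j = value of row i, column j (columns 0..k)
def rv (S : List Int) : Nat → Int → Bool
  | 0, j => decide (j = 0)
  | i + 1, j =>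
    if j = 0 then true
    else if j < S.getD i 0 then rv S i j
    else rv S i j || rv S i (j - S.getD i 0)

-- B's reachable-sum sets, per prefix length
def reachSet (S : List Int) (k : Int) : Nat → PySem.Set Int
  | 0 => PySem.Set.ofList [0]
  | i + 1 => PySem.Set.union (reachSet S k i)
      (((reachSet S k i).filter (fun r => decide (r + S.getD i 0 ≤ k))).map (fun r => r + S.getD i 0))

lemma rv_zero (S : List Int) (i : Nat) : rv S i 0 = true := by
  cases i <;> simp [rv]

lemma length_foldl_pySetD (g : Int → Bool) (L : List Int) (r : List Bool) :
    (L.foldl (fun r j => PySem.List.pySetD r j (g j)) r).length = r.length := by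
  induction L generalizing r with
  | nil => rfl
  | cons j L ih => simp [List.foldl_cons, ih, PySem.List.length_pySetD]

lemma rowSetRange_aux (f : Int → Bool) (m : Nat) (r : List Bool) (c : Nat) :
    (rowSetRange f (1 + (m : Int)) r)[c]? =
      if 1 ≤ c ∧ c < 1 + m ∧ c < r.length then some (f c) else r[c]? := by
  induction m with
  | zero =>
    simp [rowSetRange]
    omega
  | succ m ih =>
    have hcast : (1 : Int) + ((m : Nat) + 1 : Nat) = (1 + (m:Int)) + 1 := by push_cast; ring
    rw [rowSetRange, hcast, PySem.List.pyRange_one_succ_right (by omega), List.foldl_append,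
        List.foldl_cons, List.foldl_nil, PySem.List.pySetD_of_nonneg _ _ (by omega)]
    have h2 : ((1:Int) + (m:Int)).toNat = 1 + m := by omega
    have hlen : (List.foldl (fun r j => PySem.List.pySetD r j (f j)) r
        (PySem.List.pyRange 1 (1+(m:Int)) 1)).length = r.length := length_foldl_pySetD f _ r
    simp only [rowSetRange] at ih
    rw [h2, List.getElem?_set, hlen, ih]
    by_cases hc : 1 + m = c
    · subst hc
      by_cases h : 1 + m < r.length
      · rw [if_pos rfl, if_pos h, if_pos ⟨by omega, by omega, h⟩]
        norm_cast
      · rw [if_pos rfl, if_neg h, if_neg (by omega), Eq.comm]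
        exact List.getElem?_eq_none (by omega)
    · rw [if_neg hc]
      by_cases hcc : 1 ≤ c ∧ c < 1 + m ∧ c < r.length
      · rw [if_pos hcc, if_pos ⟨hcc.1, by omega, hcc.2.2⟩]
      · rw [if_neg hcc, if_neg (by omega)]

lemma rowSetRange_getElem? (f : Int → Bool) (b : Int) (r : List Bool) (c : Nat) :
    (rowSetRange f b r)[c]? =
      if 1 ≤ c ∧ (c : Int) < b ∧ c < r.length then some (f c) else r[c]? := by
  by_cases h : b ≤ 1
  · rw [rowSetRange, PySem.List.pyRange_one_eq_nil h, List.foldl_nil,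
      if_neg (by rintro ⟨h1, h2, -⟩; omega)]
  · have hb : b = 1 + ((b - 1).toNat : Int) := by omega
    rw [hb, rowSetRange_aux]
    by_cases hcc : 1 ≤ c ∧ c < 1 + (b - 1).toNat ∧ c < r.length
    · rw [if_pos hcc, if_pos ⟨hcc.1, by omega, hcc.2.2⟩]
    · rw [if_neg hcc, if_neg (by rintro ⟨h1, h2, h3⟩; exact hcc ⟨h1, by omega, h3⟩)]

lemma rowSetRange_congr (f g : Int → Bool) (b : Int) (r : List Bool)
    (h : ∀ c : Nat, 1 ≤ c → (c : Int) < b → c < r.length → f c = g c) :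
    rowSetRange f b r = rowSetRange g b r := by
  apply List.ext_getElem?
  intro c
  rw [rowSetRange_getElem?, rowSetRange_getElem?]
  split_ifs with hc
  · rw [h c hc.1 hc.2.1 hc.2.2]
  · rfl

lemma rows_getD_set_ne (d : List (List Bool)) (i m : Nat) (r : List Bool) (h : i ≠ m) :
    (d.set i r).getD m [] = d.getD m [] := by
  rw [List.getD_eq_getElem?_getD, List.getD_eq_getElem?_getD, List.getElem?_set, if_neg h]

lemma rows_getD_set_self (d : List (List Bool)) (i : Nat) (r : List Bool) :
    (d.set i r).getD i [] = if i < d.length then r else [] := by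
  rw [List.getD_eq_getElem?_getD, List.getElem?_set, if_pos rfl]
  split_ifs <;> rfl

lemma rows_getD_of_le (d : List (List Bool)) (i : Nat) (h : d.length ≤ i) :
    d.getD i [] = [] := by
  rw [List.getD_eq_getElem?_getD, List.getElem?_eq_none (by omega)]
  rfl

lemma set_getD_self (d : List (List Bool)) (i : Nat) : d.set i (d.getD i []) = d := by
  by_cases h : i < d.length
  · have hg : d.getD i [] = d[i] := by
      rw [List.getD_eq_getElem?_getD, List.getElem?_eq_getElem h]
      rfl
    rw [hg]
    exact List.set_getElem_self h
  · exact List.set_eq_of_length_le (by omega)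

lemma rows_getD_set_gen (d : List (List Bool)) (i : Nat) (g : List Bool → List Bool)
    (hg : g [] = []) : (d.set i (g (d.getD i []))).getD i [] = g (d.getD i []) := by
  rw [rows_getD_set_self]
  split_ifs with h
  · rfl
  · rw [rows_getD_of_le d i (by omega), hg]

lemma foldl_rowLocal (i : Nat) (F : List Bool → Int → List Bool)
    (step : List (List Bool) → Int → List (List Bool))
    (d0 : List (List Bool)) (L : List Int)
    (hF : ∀ j ∈ L, F [] j = [])
    (hstep : ∀ (e : List (List Bool)), ∀ j ∈ L,
        (∀ m : Nat, m ≠ i → e.getD m [] = d0.getD m []) →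
        step e j = e.set i (F (e.getD i []) j)) :
    ∀ (e : List (List Bool)), (∀ m : Nat, m ≠ i → e.getD m [] = d0.getD m []) →
      L.foldl step e = e.set i (L.foldl F (e.getD i [])) := by
  induction L with
  | nil => intro e he; exact (set_getD_self e i).symm
  | cons j L ih =>
    intro e he
    rw [List.foldl_cons, hstep e j (List.mem_cons_self) he, List.foldl_cons]
    have he' : ∀ m : Nat, m ≠ i →
        (e.set i (F (e.getD i []) j)).getD m [] = d0.getD m [] :=
      fun m hm => (rows_getD_set_ne e i m _ (fun h => hm h.symm)).trans (he m hm)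
    rw [ih (fun j hj => hF j (List.mem_cons_of_mem _ hj))
        (fun e j hj ha => hstep e j (List.mem_cons_of_mem _ hj) ha) _ he']
    rw [List.set_set]
    congr 1
    rw [rows_getD_set_self]
    split_ifs with h
    · rfl
    · rw [rows_getD_of_le e i (by omega), hF j List.mem_cons_self]

-- per-row matrix steps of A
def colStep (t : Nat) (d : List (List Bool)) : List (List Bool) :=
  d.set t ((d.getD t []).set 0 true)

def pullVal (prev : List Bool) (s j : Int) : Bool :=
  if j < s then PySem.List.pyGetD prev j false
  else PySem.List.pyGetD prev j false || PySem.List.pyGetD prev (j - s) false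

def pullStep (S : List Int) (k : Int) (t : Nat) (d : List (List Bool)) : List (List Bool) :=
  d.set (t + 1) (rowSetRange (pullVal (d.getD t []) (S.getD t 0)) (k + 1) (d.getD (t + 1) []))

def Fm (k : Int) (d : List (List Bool)) : List (List Bool) :=
  d.set 0 (rowSetRange (fun _ => false) (k + 1) (d.getD 0 []))

lemma pySetD_nil (j : Int) (v : Bool) : PySem.List.pySetD [] j v = [] :=
  List.eq_nil_of_length_eq_zero (PySem.List.length_pySetD [] j v)

lemma cellSet_nat (d : List (List Bool)) (i : Nat) (j : Int) (v : Bool) :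
    cellSet d (i : Int) j v = d.set i (PySem.List.pySetD (d.getD i []) j v) := by
  rw [cellSet, PySem.List.pyGetD_natCast, PySem.List.pySetD_natCast]

lemma cellGet_nat (d : List (List Bool)) (i : Nat) (j : Int) :
    cellGet d (i : Int) j = PySem.List.pyGetD (d.getD i []) j false := by
  rw [cellGet, PySem.List.pyGetD_natCast]

lemma Ffold_eq (k : Int) (d : List (List Bool)) :
    (PySem.List.pyRange 1 (k + 1) 1).foldl (fun d j => cellSet d 0 j false) d =
      d.set 0 (rowSetRange (fun _ => false) (k + 1) (d.getD 0 [])) := by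
  exact foldl_rowLocal 0 (fun r j => PySem.List.pySetD r j false)
    (fun d j => cellSet d 0 j false) d (PySem.List.pyRange 1 (k + 1) 1)
    (fun j hj => pySetD_nil j false)
    (fun e j hj ha => by simpa using cellSet_nat e 0 j false)
    d (fun _ _ => rfl)

lemma Ainner_eq (S : List Int) (k : Int) (t : Nat) (d : List (List Bool)) :
    (PySem.List.pyRange 1 (k + 1) 1).foldl (fun d j =>
      if j < PySem.List.pyGetD S (t : Int) 0 then
        cellSet d ((t + 1 : Nat) : Int) j (cellGet d (t : Int) j)
      else cellSet d ((t + 1 : Nat) : Int) j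
        (cellGet d (t : Int) j || cellGet d (t : Int) (j - PySem.List.pyGetD S (t : Int) 0))) d
    = pullStep S k t d := by
  exact foldl_rowLocal (t + 1)
    (fun r j => PySem.List.pySetD r j (pullVal (d.getD t []) (S.getD t 0) j))
    _ d (PySem.List.pyRange 1 (k + 1) 1)
    (fun j hj => pySetD_nil j _)
    (fun e j hj ha => by
      have hpv : ∀ jj : Int, cellGet e (t : Int) jj = PySem.List.pyGetD (d.getD t []) jj false := by
        intro jj
        rw [cellGet_nat, ha t (by omega)]
      simp only [hpv, PySem.List.pyGetD_natCast, cellSet_nat, pullVal]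
      split_ifs with hc <;> rfl)
    d (fun _ _ => rfl)

lemma colStep_set_comm (m i : Nat) (h : m ≠ i) (d : List (List Bool)) (r : List Bool) :
    colStep m (d.set i r) = (colStep m d).set i r := by
  rw [colStep, colStep, rows_getD_set_ne d i m r (fun hh => h hh.symm), List.set_comm _ _ h.symm]

lemma comm1 (m a i : Nat) (hma : m ≠ a) (hmi : m ≠ i) (G : List Bool → List Bool → List Bool)
    (d : List (List Bool)) :
    colStep m (d.set i (G (d.getD a []) (d.getD i []))) =
      (colStep m d).set i (G ((colStep m d).getD a []) ((colStep m d).getD i [])) := by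
  rw [colStep_set_comm m i hmi]
  rw [show (colStep m d).getD a [] = d.getD a [] from rows_getD_set_ne d m a _ hma,
    show (colStep m d).getD i [] = d.getD i [] from rows_getD_set_ne d m i _ hmi]

lemma foldl_comm_g {β : Type} (L : List β) (g : List (List Bool) → List (List Bool))
    (step : List (List Bool) → β → List (List Bool))
    (h : ∀ d a, a ∈ L → step (g d) a = g (step d a)) :
    ∀ d, L.foldl step (g d) = g (L.foldl step d) := by
  induction L with
  | nil => intro d; rfl
  | cons a L ih =>
    intro d
    rw [List.foldl_cons, h d a List.mem_cons_self, List.foldl_cons,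
      ih (fun d a ha => h d a (List.mem_cons_of_mem _ ha))]

lemma Fm_comm_colStep (k : Int) (m : Nat) (hm : m ≠ 0) (d : List (List Bool)) :
    colStep m (Fm k d) = Fm k (colStep m d) :=
  comm1 m (m + 1) 0 (by omega) hm (fun _ r => rowSetRange (fun _ => false) (k + 1) r) d

lemma cellSet_col0 (d : List (List Bool)) (t : Nat) :
    cellSet d (t : Int) 0 true = colStep t d := by
  rw [cellSet_nat, colStep]
  congr 1
  rw [PySem.List.pySetD_of_nonneg _ _ (le_refl 0)]
  rfl

-- the post-initialisation matrix of A: all rows col 0 true, row 0 cols 1..k false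
def E0 (S : List Int) (k : Int) (dp : List (List Bool)) : List (List Bool) :=
  (List.range S.length).foldl (fun d t => colStep (t + 1) d) (Fm k (colStep 0 dp))

-- A reduces to pullSteps over E0
lemma A_reduced (S : List Int) (k : Int) (dp : List (List Bool)) :
    generate_dp_matrix S k dp =
      (List.range S.length).foldl (fun d t => pullStep S k t d) (E0 S k dp) := by
  have hcast1 : ∀ t : Nat, (1 : Int) + (t : Int) = ((t + 1 : Nat) : Int) := fun t => by
    push_cast; ring
  simp only [generate_dp_matrix, PySem.List.len_eq, E0]
  rw [PySem.List.pyRange_zero, show (((S.length : Int)) + 1).toNat = S.length + 1 by omega,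
    List.foldl_map]
  rw [show (fun (d : List (List Bool)) (t : Nat) => cellSet d (t : Int) 0 true)
      = (fun d t => colStep t d) from funext₂ (fun d t => cellSet_col0 d t)]
  rw [PySem.List.pyRange_one 1 ((S.length : Int) + 1),
    show (((S.length : Int)) + 1 - 1).toNat = S.length by omega, List.foldl_map]
  have hcast3 : ∀ t : Nat, ((t + 1 : Nat) : Int) - 1 = ((t : Nat) : Int) := fun t => by
    push_cast; ring
  simp only [hcast1, hcast3]
  rw [Ffold_eq]
  simp only [show ∀ X : List (List Bool), X.set 0 (rowSetRange (fun _ => false) (k + 1) (X.getD 0 []))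
      = Fm k X from fun X => rfl]
  rw [List.range_succ_eq_map, List.foldl_cons, List.foldl_map]
  simp only [Nat.succ_eq_add_one]
  rw [← foldl_comm_g (List.range S.length) (Fm k) (fun d t => colStep (t + 1) d)
    (fun d t ht => Fm_comm_colStep k (t + 1) (by omega) d) (colStep 0 dp)]
  rw [show (fun (d : List (List Bool)) (t : Nat) =>
      (PySem.List.pyRange 1 (k + 1) 1).foldl (fun d j =>
        if j < PySem.List.pyGetD S (t : Int) 0 then
          cellSet d ((t + 1 : Nat) : Int) j (cellGet d (t : Int) j)
        else cellSet d ((t + 1 : Nat) : Int) j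
          (cellGet d (t : Int) j || cellGet d (t : Int) (j - PySem.List.pyGetD S (t : Int) 0))) d)
    = (fun d t => pullStep S k t d) from funext₂ (fun d t => Ainner_eq S k t d)]

-- generic: a fold of independent row updates, read off pointwise
lemma rowUpdate_char (g : Nat → List Bool → List Bool) (L : List Nat) (hL : L.Nodup)
    (d : List (List Bool)) (m : Nat) :
    (L.foldl (fun d i => d.set i (g i (d.getD i []))) d)[m]? =
      if m ∈ L then (d[m]?).map (g m) else d[m]? := by
  induction L generalizing d with
  | nil => simp
  | cons i L ih =>
    rw [List.foldl_cons, ih (List.Nodup.of_cons hL)]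
    by_cases him : m = i
    · subst him
      have hm : m ∉ L := (List.nodup_cons.mp hL).1
      rw [if_neg hm, if_pos List.mem_cons_self, List.getElem?_set, if_pos rfl]
      by_cases h : m < d.length
      · rw [if_pos h, List.getElem?_eq_getElem h, Option.map_some,
          List.getD_eq_getElem?_getD, List.getElem?_eq_getElem h]
        rfl
      · rw [if_neg h, List.getElem?_eq_none (by omega), Option.map_none]
    · have h1 : (d.set i (g i (d.getD i [])))[m]? = d[m]? := by
        rw [List.getElem?_set, if_neg (fun h => him h.symm)]
      rw [h1]
      by_cases hm : m ∈ L
      · rw [if_pos hm, if_pos (List.mem_cons_of_mem _ hm)]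
      · rw [if_neg hm, if_neg (by simp [List.mem_cons, him, hm])]

lemma X_getElem? (S : List Int) (k : Int) (dp : List (List Bool)) (m : Nat) :
    (Fm k (colStep 0 dp))[m]? =
      if m = 0 then (dp[0]?).map (fun r => mkRow (rv S 0) k r) else dp[m]? := by
  have hcongr : ∀ r : List Bool,
      rowSetRange (fun _ => false) (k + 1) (r.set 0 true) = mkRow (rv S 0) k r := by
    intro r
    rw [mkRow]
    exact rowSetRange_congr _ _ _ _ (fun c hc _ _ => by
      simp [rv]; omega)
  rw [Fm, colStep]
  by_cases hm : m = 0
  · subst hm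
    rw [List.getElem?_set, if_pos rfl, List.length_set]
    by_cases h : 0 < dp.length
    · rw [if_pos h, rows_getD_set_self, if_pos h, List.getElem?_eq_getElem h, Option.map_some,
        List.getD_eq_getElem?_getD, List.getElem?_eq_getElem h]
      simp only [Option.getD_some]
      rw [if_pos trivial, hcongr]
    · rw [if_neg h, List.getElem?_eq_none (by omega), Option.map_none, if_pos rfl]
  · rw [List.getElem?_set, if_neg (fun h => hm h.symm), List.getElem?_set,
      if_neg (fun h => hm h.symm), if_neg hm]

lemma E0_getElem? (S : List Int) (k : Int) (dp : List (List Bool)) (m : Nat) :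
    (E0 S k dp)[m]? =
      if m = 0 then (dp[0]?).map (fun r => mkRow (rv S 0) k r)
      else if m ≤ S.length then (dp[m]?).map (fun r => r.set 0 true)
      else dp[m]? := by
  have hfold : E0 S k dp = ((List.range S.length).map (· + 1)).foldl
      (fun d i => d.set i ((fun _ (r : List Bool) => r.set 0 true) i (d.getD i []))) (Fm k (colStep 0 dp)) := by
    rw [E0, List.foldl_map]
    rfl
  have hnodup : ((List.range S.length).map (· + 1)).Nodup :=
    List.Nodup.map (fun a b h => by omega) (List.nodup_range)
  rw [hfold, rowUpdate_char (fun _ r => r.set 0 true) _ hnodup (Fm k (colStep 0 dp)) m,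
    X_getElem? S k dp m]
  by_cases hm : m = 0
  · subst hm
    rw [if_neg (by simp)]
    simp
  · have hmem : m ∈ (List.range S.length).map (· + 1) ↔ 1 ≤ m ∧ m ≤ S.length := by
      simp only [List.mem_map, List.mem_range]
      constructor
      · rintro ⟨x, hx, rfl⟩
        omega
      · rintro ⟨hh1, hh2⟩
        exact ⟨m - 1, by omega, by omega⟩
    rw [if_neg hm, if_neg hm]
    by_cases h : m ≤ S.length
    · rw [if_pos (hmem.mpr ⟨by omega, h⟩), if_pos h]
    · rw [if_neg (fun hh => h (hmem.mp hh).2), if_neg h]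

-- reading a canonical row gives the truth table back (needs the row long enough)
lemma pyGetD_mkRow (S : List Int) (t : Nat) (k : Int) (r : List Bool)
    (hr : k.toNat + 1 ≤ r.length) (j : Int) (h0 : 0 ≤ j) (hk : j ≤ k) :
    PySem.List.pyGetD (mkRow (rv S t) k r) j false = rv S t j := by
  have hj : j = ((j.toNat : Nat) : Int) := by omega
  rw [hj, PySem.List.pyGetD_natCast, mkRow, List.getD_eq_getElem?_getD, rowSetRange_getElem?]
  by_cases hc : 1 ≤ j.toNat
  · rw [if_pos ⟨hc, by omega, by simp; omega⟩]
    rfl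
  · have hc0 : j.toNat = 0 := by omega
    rw [if_neg (by omega), hc0, List.getElem?_set, if_pos rfl, if_pos (by omega)]
    simp [rv_zero]

lemma A_char (S : List Int) (k : Int) (dp : List (List Bool))
    (hlen : S.length + 1 ≤ dp.length)
    (hrows : ∀ m < S.length + 1, k.toNat + 1 ≤ (dp.getD m []).length)
    (hnn : 0 ≤ k → ∀ x ∈ S, 0 ≤ x) :
    ∀ t, t ≤ S.length → ∀ m,
      ((List.range t).foldl (fun d i => pullStep S k i d) (E0 S k dp))[m]? =
        if m ≤ t then some (mkRow (rv S m) k (dp.getD m []))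
        else if m ≤ S.length then some ((dp.getD m []).set 0 true)
        else dp[m]? := by
  intro t
  induction t with
  | zero =>
    intro _ m
    rw [List.range_zero, List.foldl_nil, E0_getElem?]
    have hget : ∀ m' : Nat, m' ≤ S.length → dp[m']? = some (dp.getD m' []) := by
      intro m' hm'
      rw [List.getD_eq_getElem?_getD, List.getElem?_eq_getElem (show m' < dp.length by omega)]
      rfl
    by_cases hm : m = 0
    · subst hm
      rw [if_pos rfl, if_pos (Nat.le_refl 0), hget 0 (by omega), Option.map_some]
    · rw [if_neg hm, if_neg (show ¬ m ≤ 0 from by omega)]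
      by_cases h : m ≤ S.length
      · rw [if_pos h, if_pos h, hget m h, Option.map_some]
      · rw [if_neg h, if_neg h]
  | succ t ih =>
    intro ht m
    have iht := ih (by omega)
    rw [List.range_succ, List.foldl_append, List.foldl_cons, List.foldl_nil]
    set D := (List.range t).foldl (fun d i => pullStep S k i d) (E0 S k dp) with hD
    have hDt : D.getD t [] = mkRow (rv S t) k (dp.getD t []) := by
      rw [List.getD_eq_getElem?_getD, iht t, if_pos (le_refl t)]
      rfl
    have hDt1 : D.getD (t + 1) [] = (dp.getD (t + 1) []).set 0 true := by
      rw [List.getD_eq_getElem?_getD, iht (t + 1), if_neg (by omega), if_pos (by omega)]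
      rfl
    have hDlen : S.length < D.length := by
      have h := iht S.length
      by_cases hc : S.length ≤ t
      · rw [if_pos hc] at h
        exact (List.getElem?_eq_some_iff.mp h).1
      · rw [if_neg hc, if_pos (le_refl _)] at h
        exact (List.getElem?_eq_some_iff.mp h).1
    simp only [pullStep, hDt, hDt1]
    by_cases hm : m = t + 1
    · subst hm
      rw [List.getElem?_set, if_pos rfl, if_pos (by omega), if_pos (le_refl _)]
      congr 1
      rw [show mkRow (rv S (t + 1)) k (dp.getD (t + 1) [])
          = rowSetRange (rv S (t + 1)) (k + 1) ((dp.getD (t + 1) []).set 0 true) from rfl]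
      apply rowSetRange_congr
      intro c hc1 hcb hclen
      have hkc : (c : Int) ≤ k := by omega
      have hk0 : (0 : Int) ≤ k := by omega
      have hs : 0 ≤ S.getD t 0 := by
        apply hnn hk0
        rw [List.getD_eq_getElem?_getD, List.getElem?_eq_getElem (show t < S.length by omega)]
        exact List.getElem_mem _
      have hrowlen : k.toNat + 1 ≤ (dp.getD t []).length := hrows t (by omega)
      have hget : ∀ j : Int, 0 ≤ j → j ≤ k →
          PySem.List.pyGetD (mkRow (rv S t) k (dp.getD t [])) j false = rv S t j :=
        fun j h0 hk' => pyGetD_mkRow S t k _ hrowlen j h0 hk'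
      have hrv1 : rv S (t + 1) (c : Int) =
          (if (c : Int) = 0 then true else if (c : Int) < S.getD t 0 then rv S t (c : Int)
           else rv S t (c : Int) || rv S t ((c : Int) - S.getD t 0)) := rfl
      simp only [pullVal]
      rw [hrv1, if_neg (show ¬ (c : Int) = 0 from by omega)]
      by_cases hlt : (c : Int) < S.getD t 0
      · rw [if_pos hlt, if_pos hlt, hget (c : Int) (by omega) hkc]
      · rw [if_neg hlt, if_neg hlt, hget (c : Int) (by omega) hkc,
          hget ((c : Int) - S.getD t 0) (by omega) (by omega)]
    · rw [List.getElem?_set, if_neg (fun h => hm h.symm), iht m]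
      by_cases h1 : m ≤ t
      · rw [if_pos h1, if_pos (show m ≤ t + 1 from by omega)]
      · rw [if_neg h1, if_neg (show ¬ m ≤ t + 1 from by omega)]

-- B row render is a row update
lemma Brow_eq (k : Int) (i : Nat) (R : PySem.Set Int) (d : List (List Bool)) :
    (PySem.List.pyRange 1 (k + 1) 1).foldl
        (fun d j => cellSet d (i : Int) j (PySem.Set.contains R j))
        (cellSet d (i : Int) 0 true)
      = d.set i (mkRow (fun j => PySem.Set.contains R j) k (d.getD i [])) := by
  have hA : cellSet d (i : Int) 0 true = d.set i ((d.getD i []).set 0 true) := by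
    rw [cellSet_nat]
    congr 1
    rw [PySem.List.pySetD_of_nonneg _ _ (le_refl 0)]
    rfl
  rw [hA]
  rw [foldl_rowLocal i (fun r j => PySem.List.pySetD r j (PySem.Set.contains R j))
    _ (d.set i ((d.getD i []).set 0 true)) (PySem.List.pyRange 1 (k + 1) 1)
    (fun j hj => pySetD_nil j _)
    (fun e j hj ha => cellSet_nat e i j _)
    _ (fun _ _ => rfl)]
  rw [List.set_set]
  congr 1
  rw [rows_getD_set_gen d i (fun r => r.set 0 true) rfl]
  rfl

lemma enumerate_map_range {α : Type} (f : Nat → α) (N : Nat) :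
    PySem.List.enumerate ((List.range N).map f) 0 =
      (List.range N).map (fun (m : Nat) => ((m : Int), f m)) := by
  apply List.ext_getElem?
  intro c
  rw [PySem.List.getElem?_enumerate]
  simp only [List.getElem?_map]
  by_cases h : c < N
  · simp [h]
  · simp [h]

lemma reachSet_prefix (S : List Int) (s : Int) (k : Int) :
    ∀ i, i ≤ S.length → reachSet (S ++ [s]) k i = reachSet S k i := by
  intro i
  induction i with
  | zero => intro _; rfl
  | succ i ih =>
    intro h
    have hgd : (S ++ [s]).getD i 0 = S.getD i 0 := by
      rw [List.getD_eq_getElem?_getD, List.getD_eq_getElem?_getD,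
        List.getElem?_append_left (by omega)]
    rw [reachSet, reachSet, ih (by omega), hgd]

-- the port's fold builds exactly the reachSet family
lemma rowSets_fold (k : Int) (S : List Int) :
    (S.foldl (fun (acc : List (PySem.Set Int) × PySem.Set Int) s =>
        (acc.1 ++ [PySem.Set.union acc.2 ((acc.2.filter (fun r => decide (r + s ≤ k))).map (fun r => r + s))],
         PySem.Set.union acc.2 ((acc.2.filter (fun r => decide (r + s ≤ k))).map (fun r => r + s))))
      ([PySem.Set.ofList [0]], PySem.Set.ofList [0]))
    = ((List.range (S.length + 1)).map (reachSet S k), reachSet S k S.length) := by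
  induction S using List.reverseRecOn with
  | nil => rfl
  | append_singleton S s ih =>
    rw [List.foldl_append, ih, List.foldl_cons, List.foldl_nil]
    dsimp only
    have hgd : (S ++ [s]).getD S.length 0 = s := by
      rw [List.getD_eq_getElem?_getD, List.getElem?_concat_length]
      rfl
    have hreach : reachSet (S ++ [s]) k (S.length + 1) =
        PySem.Set.union (reachSet S k S.length)
          (((reachSet S k S.length).filter (fun r => decide (r + s ≤ k))).map (fun r => r + s)) := by
      rw [reachSet, reachSet_prefix S s k S.length (le_refl _), hgd]
    have hmap : (List.range (S.length + 1)).map (reachSet (S ++ [s]) k) =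
        (List.range (S.length + 1)).map (reachSet S k) := by
      apply List.map_congr_left
      intro i hi
      exact reachSet_prefix S s k i (by have := List.mem_range.mp hi; omega)
    rw [show (S ++ [s]).length = S.length + 1 from by simp]
    conv_rhs => rw [List.range_succ]
    rw [List.map_append, hmap]
    simp only [List.map_cons, List.map_nil]
    rw [hreach]

lemma mem_reachSet (S : List Int) (k : Int) (hk : 0 ≤ k) (hnn : ∀ x ∈ S, 0 ≤ x) :
    ∀ i, i ≤ S.length → ∀ j : Int,
      (j ∈ reachSet S k i ↔ 0 ≤ j ∧ j ≤ k ∧ rv S i j = true) := by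
  intro i
  induction i with
  | zero =>
    intro _ j
    constructor
    · intro h
      have hj : j = 0 := by simpa [reachSet, PySem.Set.ofList, PySem.Set.add] using h
      subst hj
      exact ⟨le_refl 0, hk, by simp [rv]⟩
    · rintro ⟨h0, hjk, hrv⟩
      have hj : j = 0 := by simpa [rv] using hrv
      subst hj
      simp [reachSet, PySem.Set.ofList, PySem.Set.add]
  | succ i ih =>
    intro hi j
    have hslt : i < S.length := by omega
    have hs : 0 ≤ S.getD i 0 := by
      apply hnn
      rw [List.getD_eq_getElem?_getD, List.getElem?_eq_getElem hslt]
      exact List.getElem_mem hslt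
    have ihh := ih (by omega)
    have hrv1 : ∀ jj : Int, rv S (i + 1) jj =
        (if jj = 0 then true else if jj < S.getD i 0 then rv S i jj
         else rv S i jj || rv S i (jj - S.getD i 0)) := fun jj => rfl
    rw [reachSet, PySem.Set.mem_union]
    constructor
    · rintro (h | h)
      · obtain ⟨h0, hjk, hrv⟩ := (ihh j).mp h
        refine ⟨h0, hjk, ?_⟩
        rw [hrv1]
        split_ifs with h1 h2
        · rfl
        · exact hrv
        · rw [hrv]
          rfl
      · simp only [List.mem_map, List.mem_filter] at h
        obtain ⟨r, ⟨hrA, hrle⟩, hEq⟩ := h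
        obtain ⟨hr0, hrk, hrrv⟩ := (ihh r).mp hrA
        have hle : r + S.getD i 0 ≤ k := by simpa using hrle
        subst hEq
        refine ⟨by omega, hle, ?_⟩
        rw [hrv1]
        split_ifs with h1 h2
        · rfl
        · omega
        · rw [show r + S.getD i 0 - S.getD i 0 = r from by ring, hrrv, Bool.or_true]
    · rintro ⟨h0, hjk, hrv⟩
      by_cases hj0 : j = 0
      · subst hj0
        exact Or.inl ((ihh 0).mpr ⟨le_refl 0, hk, rv_zero S i⟩)
      · rw [hrv1, if_neg hj0] at hrv
        by_cases hjs : j < S.getD i 0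
        · rw [if_pos hjs] at hrv
          exact Or.inl ((ihh j).mpr ⟨h0, hjk, hrv⟩)
        · rw [if_neg hjs] at hrv
          rcases Bool.or_eq_true_iff.mp hrv with h | h
          · exact Or.inl ((ihh j).mpr ⟨h0, hjk, h⟩)
          · refine Or.inr ?_
            simp only [List.mem_map, List.mem_filter]
            exact ⟨j - S.getD i 0, ⟨(ihh (j - S.getD i 0)).mpr ⟨by omega, by omega, h⟩,
              by simp; omega⟩, by ring⟩

-- B reduces to a fold of row updates from the reachSet family
lemma B_reduced (S : List Int) (k : Int) (dp : List (List Bool)) :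
    generate_dp_matrix_alt S k dp =
      (List.range (S.length + 1)).foldl
        (fun d m => d.set m ((fun m (r : List Bool) =>
          mkRow (fun j => PySem.Set.contains (reachSet S k m) j) k r) m (d.getD m []))) dp := by
  simp only [generate_dp_matrix_alt]
  rw [rowSets_fold k S]
  rw [show ((List.range (S.length + 1)).map (reachSet S k), reachSet S k S.length).1
      = (List.range (S.length + 1)).map (reachSet S k) from rfl]
  rw [enumerate_map_range, List.foldl_map]
  dsimp only
  rw [show (fun (d : List (List Bool)) (m : Nat) =>
      (PySem.List.pyRange 1 (k + 1) 1).foldl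
        (fun d j => cellSet d (m : Int) j (PySem.Set.contains (reachSet S k m) j))
        (cellSet d (m : Int) 0 true))
    = (fun (d : List (List Bool)) (m : Nat) => d.set m
        (mkRow (fun j => PySem.Set.contains (reachSet S k m) j) k (d.getD m []))) from
    funext₂ (fun d m => Brow_eq k m (reachSet S k m) d)]

lemma pv_final : ∀ (S : List Int) (k : Int) (dp : List (List Bool)),
    Pre_generate_dp_matrix S k dp → generate_dp_matrix S k dp = generate_dp_matrix_alt S k dp := by
  intro S k dp hpre
  obtain ⟨hlen, hrows, hnn⟩ := hpre
  rw [A_reduced, B_reduced]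
  apply List.ext_getElem?
  intro m
  rw [A_char S k dp hlen hrows hnn S.length (le_refl _) m,
    rowUpdate_char _ _ (List.nodup_range) dp m]
  by_cases h : m ≤ S.length
  · rw [if_pos h, if_pos (List.mem_range.mpr (by omega)),
      List.getElem?_eq_getElem (show m < dp.length by omega), Option.map_some]
    congr 1
    have hgd : dp.getD m [] = dp[m] := by
      rw [List.getD_eq_getElem?_getD, List.getElem?_eq_getElem (show m < dp.length by omega)]
      rfl
    rw [← hgd, mkRow, mkRow]
    apply rowSetRange_congr
    intro c hc1 hcb hclen
    have hk0 : (0 : Int) ≤ k := by omega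
    have hmem := mem_reachSet S k hk0 (hnn hk0) m h (c : Int)
    by_cases hrv : rv S m (c : Int) = true
    · rw [hrv, (PySem.Set.contains_iff _ _).mpr (hmem.mpr ⟨by omega, by omega, hrv⟩)]
    · cases hco : PySem.Set.contains (reachSet S k m) (c : Int) with
      | false => simp at hrv; rw [hrv]
      | true => exact absurd (hmem.mp ((PySem.Set.contains_iff _ _).mp hco)).2.2 hrv
  · rw [if_neg h, if_neg (by omega), if_neg (by simp [List.mem_range]; omega)]

-- ===== VERDICT (by name: the statement is the Claim_ definition above) =====
theorem generate_dp_matrix_spec : Claim_equal_generate_dp_matrix := by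
  intro S k dp _ hpre
  exact pv_final S k dp hpre
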